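-- pv_equiv track=rewrite | github.com/unhhyyeexx/ProblemSolving | 백준/Silver/1343. 폴리오미노/폴리오미노.py | solution
-- ===== SOURCE A (Python) =====
-- def solution(board):
--     answer = ''
--     n = len(board)
--
--     cnt = 0
--     for i in range(n):
--         if board[i] == '.':
--             if cnt > 0 and cnt%2 == 0:
--                 answer += 'AAAA' * (cnt//4)
--                 cnt %= 4
--                 answer += 'BB' * (cnt//2)
--                 cnt = 0
--             elif cnt > 0 and cnt%2 != 0:
--                 return -1
--
--             answer += '.'
--
--         else:
--             cnt += 1
--     if cnt > 0:
--         if cnt % 2 != 0: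
--                 return -1
--         answer += 'AAAA' * (cnt//4)
--         cnt %= 4
--         answer += 'BB' * (cnt//2)
--         cnt = 0
--     return answer
-- ===== SOURCE B (Python) =====
-- def solution(board):
--     segs = board.split('.')
--     if any(len(s) % 2 for s in segs):
--         return -1
--     return '.'.join('AAAA' * (len(s) // 4) + 'BB' * ((len(s) % 4) // 2) for s in segs)
-- ===== Notes on version B (the rewrite author's own statement) =====
-- stated objective: simpler
-- what changed: Replaced the character-by-character counter-flushing loop (two in-loop flush branches plus a trailing flush, built by repeated string +=) by split into dot-separated runs, a parity check over the runs, and a single join of each run's tiling.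
-- outside the precondition, e.g. on solution('X'): A returns -1, B returns -1
import Mathlib
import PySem

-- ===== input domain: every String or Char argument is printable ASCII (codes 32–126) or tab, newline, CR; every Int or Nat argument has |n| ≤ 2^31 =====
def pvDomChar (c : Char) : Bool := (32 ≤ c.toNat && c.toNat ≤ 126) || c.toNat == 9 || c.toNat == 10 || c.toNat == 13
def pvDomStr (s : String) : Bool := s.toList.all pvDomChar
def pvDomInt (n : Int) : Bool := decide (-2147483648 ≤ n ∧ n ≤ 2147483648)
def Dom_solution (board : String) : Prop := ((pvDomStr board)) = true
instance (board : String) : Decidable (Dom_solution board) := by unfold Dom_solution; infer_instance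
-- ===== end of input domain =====

-- B replaces A's per-character counter loop by split-into-runs, map each run to its tiling, join — simpler decomposition, same cost.

-- ===== PORT A =====
-- 'AAAA' * (cnt//4) + 'BB' * ((cnt%4)//2)  (shared tiling expression of both sources)
def tile (cnt : Nat) : List Char :=
  (List.replicate (cnt / 4) ['A','A','A','A']).flatten ++ (List.replicate ((cnt % 4) / 2) ['B','B']).flatten

-- the for-loop with its early `return -1` (none = Python's -1, excluded by Pre_), then the trailing flush
def loopA : List Char → Nat → List Char → Option (List Char)
  | ans, cnt, [] =>
      if 0 < cnt then (if cnt % 2 ≠ 0 then none else some (ans ++ tile cnt)) else some ans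
  | ans, cnt, c :: cs =>
      if c = '.' then
        if 0 < cnt ∧ cnt % 2 = 0 then loopA (ans ++ tile cnt ++ ['.']) 0 cs
        else if 0 < cnt ∧ cnt % 2 ≠ 0 then none
        else loopA (ans ++ ['.']) cnt cs
      else loopA ans (cnt + 1) cs

def solution (board : String) : String :=
  ((loopA [] 0 board.toList).getD []) |> String.ofList

-- ===== PORT B =====
def solution_alt (board : String) : String :=
  let segs := board.toList.splitOn '.'
  if segs.any (fun s => s.length % 2 == 1) then ""   -- Python B returns -1 here; excluded by Pre_
  else (List.intercalate ['.'] (segs.map (fun s => tile s.length))) |> String.ofList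

-- ===== PRECONDITION & SPEC =====
-- Pre_ excludes boards containing a maximal run of non-'.' characters of odd length: there Python A
-- (and Python B) return the int -1, which is not a value of the declared String type.
def Pre_solution (board : String) : Prop :=
  ∀ s ∈ board.toList.splitOn '.', s.length % 2 = 0
instance (board : String) : Decidable (Pre_solution board) := by unfold Pre_solution; infer_instance

def pvWitness_solution : String := "XX.XXXX"

def Spec_solution (board : String) (out : String) : Prop := out = solution_alt board
instance (board : String) (out : String) : Decidable (Spec_solution board out) := by unfold Spec_solution; infer_instance

-- ===== CLAIM (what is proved, stated in full; the proofs are below) =====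
def Claim_equal_solution : Prop :=
  ∀ (board : String), Dom_solution board → Pre_solution board → Spec_solution board (solution board)

-- ===== LEMMAS AND PROOFS =====

theorem tile_zero : tile 0 = [] := by decide

theorem splitOn_ne_nil (cs : List Char) : cs.splitOn '.' ≠ [] := by
  simp [List.splitOn]
  exact List.splitOnP_ne_nil _ cs

def tileSegs (cnt : Nat) (segs : List (List Char)) : List (List Char) :=
  match segs with
  | [] => []
  | h :: t => tile (cnt + h.length) :: t.map (fun s => tile s.length)

theorem intercalate_cons_cons (x h : List Char) (t : List (List Char)) :
    List.intercalate ['.'] (x :: h :: t) = x ++ '.' :: List.intercalate ['.'] (h :: t) := by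
  simp [List.intercalate]

theorem loopA_eq (cs : List Char) : ∀ (ans : List Char) (cnt : Nat),
    (cnt + ((cs.splitOn '.').headI).length) % 2 = 0 →
    (∀ s ∈ (cs.splitOn '.').tail, s.length % 2 = 0) →
    loopA ans cnt cs = some (ans ++ List.intercalate ['.'] (tileSegs cnt (cs.splitOn '.'))) := by
  induction cs with
  | nil =>
      intro ans cnt h1 _
      simp [List.splitOn, List.splitOnP_nil] at h1 ⊢
      by_cases hc : 0 < cnt
      · simp [loopA, hc, tileSegs, List.intercalate]
        omega
      · have : cnt = 0 := by omega
        subst this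
        simp [loopA, tileSegs, tile_zero, List.intercalate]
  | cons c cs ih =>
      intro ans cnt h1 h2
      by_cases hc : c = '.'
      · subst hc
        have hsplit : ('.' :: cs).splitOn '.' = [] :: cs.splitOn '.' := by
          simp [List.splitOn, List.splitOnP_cons]
        rw [hsplit] at h1 h2 ⊢
        simp at h1
        obtain ⟨h, t, hht⟩ : ∃ h t, cs.splitOn '.' = h :: t := by
          cases hcs : cs.splitOn '.' with
          | nil => exact absurd hcs (splitOn_ne_nil cs)
          | cons h t => exact ⟨h, t, rfl⟩
        have ih' := ih (ans ++ tile cnt ++ ['.']) 0 (by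
            rw [hht]; simpa using h2 _ (by rw [hht]; simp)) (by
            intro s hs
            refine h2 s ?_
            simp only [List.tail_cons] at hs ⊢
            rw [hht] at hs ⊢
            exact List.mem_cons_of_mem _ hs)
        have hstep : loopA ans cnt ('.' :: cs) = loopA (ans ++ tile cnt ++ ['.']) 0 cs := by
          by_cases hpos : 0 < cnt
          · simp [loopA, hpos, h1]
          · have hz : cnt = 0 := by omega
            subst hz
            simp [loopA, tile_zero]
        rw [hstep, ih', hht]
        have : tileSegs cnt ([] :: h :: t) =
            tile cnt :: tile h.length :: t.map (fun s => tile s.length) := by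
          simp [tileSegs]
        rw [this, intercalate_cons_cons]
        have : tileSegs 0 (h :: t) = tile h.length :: t.map (fun s => tile s.length) := by
          simp [tileSegs]
        rw [this]
        simp
      · have hsplit : (c :: cs).splitOn '.' = (cs.splitOn '.').modifyHead (List.cons c) := by
          simp [List.splitOn, List.splitOnP_cons, hc]
        obtain ⟨h, t, hht⟩ : ∃ h t, cs.splitOn '.' = h :: t := by
          cases hcs : cs.splitOn '.' with
          | nil => exact absurd hcs (splitOn_ne_nil cs)
          | cons h t => exact ⟨h, t, rfl⟩
        rw [hsplit, hht] at h1 h2 ⊢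
        simp only [List.modifyHead] at h1 h2 ⊢
        have ih' := ih ans (cnt + 1) (by rw [hht]; simp at h1 ⊢; omega) (by rw [hht]; exact h2)
        rw [hht] at ih'
        have hstep : loopA ans cnt (c :: cs) = loopA ans (cnt + 1) cs := by
          simp [loopA, hc]
        rw [hstep, ih']
        have : tileSegs (cnt + 1) (h :: t) = tileSegs cnt ((c :: h) :: t) := by
          simp only [tileSegs, List.length_cons]
          have : cnt + 1 + h.length = cnt + (h.length + 1) := by omega
          rw [this]
        rw [this]

theorem tileSegs_zero (segs : List (List Char)) :
    tileSegs 0 segs = segs.map (fun s => tile s.length) := by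
  cases segs with
  | nil => rfl
  | cons h t => simp [tileSegs]

-- ===== VERDICT (by name: the statement is the Claim_ definition above) =====
theorem solution_spec : Claim_equal_solution := by
  intro board _ hpre
  unfold Spec_solution solution solution_alt
  have hany : (board.toList.splitOn '.').any (fun s => s.length % 2 == 1) = false := by
    simp only [List.any_eq_false]
    intro s hs
    have := hpre s hs
    simp [this]
  obtain ⟨h, t, hht⟩ : ∃ h t, board.toList.splitOn '.' = h :: t := by
    cases hcs : board.toList.splitOn '.' with
    | nil => exact absurd hcs (splitOn_ne_nil board.toList)
    | cons h t => exact ⟨h, t, rfl⟩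
  have hmain := loopA_eq board.toList [] 0
    (by rw [hht]; simpa using hpre h (by rw [hht]; simp))
    (by intro s hs; exact hpre s (by rw [hht] at hs ⊢; exact List.mem_cons_of_mem _ hs))
  rw [hmain]
  rw [tileSegs_zero]
  simp [hany]
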